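-- pv_equiv track=rewrite | github.com/skymygo/coding_test | programmers/blind_test/0704/q01.py | solution
-- ===== SOURCE A (Python) =====
-- def solution(lottery):
--     users = set([_[0] for _ in lottery])
--
--     people = 0
--     count = 0
--     for user in users:
--         user_lottery = [_ for _ in lottery if _[0] == user]
--         if [user, 1] in user_lottery:
--             count += user_lottery.index([user,1])+1
--             people+=1
--     if people ==0: answer =0
--     else: answer = int(count/ people)
--     return answer
-- ===== SOURCE B (Python) =====
-- def solution(lottery):
--     # One pass: per-user running count of entries, and the 1-based position of
--     # the first entry equal to [user, 1] within that user's entries.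
--     seen = {}   # user -> number of this user's entries processed so far
--     first = {}  # user -> 1-based position of the user's first winning entry
--     for e in lottery:
--         u = e[0]
--         c = seen.get(u, 0) + 1
--         seen[u] = c
--         if u not in first and len(e) == 2 and e[1] == 1:
--             first[u] = c
--     if not first:
--         return 0
--     return sum(first.values()) // len(first)
-- ===== Notes on version B (the rewrite author's own statement) =====
-- stated objective: alternative
-- what changed: A builds the user set and then, for every user, rescans and filters the whole list (plus a membership test and a list.index pass); B makes one single pass over the list with two dicts (per-user entry count, first-win position), so the per-user inner scans disappear.
import Mathlib
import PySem

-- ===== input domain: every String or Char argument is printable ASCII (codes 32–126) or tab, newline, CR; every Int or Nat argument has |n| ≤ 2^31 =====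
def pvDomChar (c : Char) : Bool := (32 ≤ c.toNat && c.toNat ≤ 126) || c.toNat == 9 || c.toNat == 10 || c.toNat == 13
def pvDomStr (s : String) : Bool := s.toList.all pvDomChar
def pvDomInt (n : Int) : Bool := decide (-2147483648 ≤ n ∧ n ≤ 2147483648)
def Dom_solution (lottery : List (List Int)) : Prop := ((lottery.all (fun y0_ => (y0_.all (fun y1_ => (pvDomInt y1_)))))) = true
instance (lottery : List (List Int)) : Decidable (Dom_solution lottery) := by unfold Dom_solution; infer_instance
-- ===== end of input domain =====

-- B replaces A's per-user rescan of the whole list by a single pass keeping two dicts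
-- (per-user entry count, first-win position); return values proved equal where every row is nonempty.

-- ===== PORT A =====
-- loop body of A's 'for user in users' loop; '_[0]' is e.headD 0 (exact: Pre_ excludes empty rows)
def solutionStep (lottery : List (List Int)) (pc : Int × Int) (user : Int) : Int × Int :=
  let userLottery := lottery.filter (fun e => e.headD 0 == user)
  if [user, 1] ∈ userLottery then
    (pc.1 + 1, pc.2 + ((((PySem.List.index? userLottery [user, 1]).getD 0 : Nat) : Int) + 1))
  else pc

def solution (lottery : List (List Int)) : Int :=
  let users : PySem.Set Int := PySem.Set.ofList (lottery.map (fun e => e.headD 0))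
  -- r.1 = people, r.2 = count; the loop order over the set cannot affect these sums
  let r := users.foldl (solutionStep lottery) (0, 0)
  -- 'int(count / people)' is PySem.Int.truncdiv (exact for |count|, |people| < 2^53)
  if r.1 == 0 then 0 else PySem.Int.truncdiv r.2 r.1

-- ===== PORT B =====
-- loop body of B's single pass: st.1 = seen (user -> entries so far), st.2 = first (user -> first-win position)
def solutionAltStep (st : PySem.Dict Int Int × PySem.Dict Int Int) (e : List Int) :
    PySem.Dict Int Int × PySem.Dict Int Int :=
  let u := e.headD 0   -- e[0]; Pre_ excludes empty rows
  let c := st.1.getD u 0 + 1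
  if !(st.2.contains u) && (e.length == 2) && (PySem.List.pyGetD e 1 0 == 1) then
    (st.1.insert u c, st.2.insert u c)
  else
    (st.1.insert u c, st.2)

def solution_alt (lottery : List (List Int)) : Int :=
  let st := lottery.foldl solutionAltStep (PySem.Dict.empty, PySem.Dict.empty)
  if st.2.size == 0 then 0
  else PySem.Int.floordiv st.2.values.sum (st.2.size : Int)

-- ===== PRECONDITION & SPEC =====
-- Pre_ excludes inputs containing an empty inner list, on which A raises IndexError at '_[0]'.
def Pre_solution (lottery : List (List Int)) : Prop := ∀ e ∈ lottery, e ≠ []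
instance (lottery : List (List Int)) : Decidable (Pre_solution lottery) := by unfold Pre_solution; infer_instance
def pvWitness_solution : List (List Int) := [[1, 1], [2, 0], [2, 1], [3, 0]]

def Spec_solution (lottery : List (List Int)) (out : Int) : Prop := out = solution_alt lottery
instance (lottery : List (List Int)) (out : Int) : Decidable (Spec_solution lottery out) := by unfold Spec_solution; infer_instance

-- ===== CLAIM (what is proved, stated in full; the proofs are below) =====
def Claim_equal_solution : Prop := ∀ (lottery : List (List Int)), Dom_solution lottery → Pre_solution lottery → Spec_solution lottery (solution lottery)

-- ===== LEMMAS AND PROOFS =====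

-- the entries of user u, the index of u's first winning entry, and its 1-based position
def pvFlt (l : List (List Int)) (u : Int) : List (List Int) := l.filter (fun e => e.headD 0 == u)
def pvWin (l : List (List Int)) (u : Int) : Option Nat := PySem.List.index? (pvFlt l u) [u, 1]
def pvPos (l : List (List Int)) (u : Int) : Int := (((pvWin l u).getD 0 : Nat) : Int) + 1

lemma A_fold (l : List (List Int)) (us : List Int) (p c : Int) :
    us.foldl (solutionStep l) (p, c) =
      (p + ((us.filter (fun u => (pvWin l u).isSome)).length : Int),
       c + ((us.filter (fun u => (pvWin l u).isSome)).map (pvPos l)).sum) := by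
  induction us generalizing p c with
  | nil => simp
  | cons u us ih =>
    rw [List.foldl_cons]
    by_cases h : [u, 1] ∈ pvFlt l u
    · have hs : (pvWin l u).isSome := (PySem.List.index?_isSome_iff _ _).mpr h
      have hstep : solutionStep l (p, c) u = (p + 1, c + pvPos l u) := by
        simp only [solutionStep, pvPos, pvWin, pvFlt] at h ⊢
        rw [if_pos h]
      rw [hstep, ih]
      simp [hs]
      constructor <;> ring
    · have hs : ¬ (pvWin l u).isSome := fun hh => h ((PySem.List.index?_isSome_iff _ _).mp hh)
      have hstep : solutionStep l (p, c) u = (p, c) := by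
        simp only [solutionStep, pvFlt] at h ⊢
        rw [if_neg h]
      rw [hstep, ih]
      simp [hs]

lemma pvFlt_append (l : List (List Int)) (e : List Int) (u : Int) :
    pvFlt (l ++ [e]) u = pvFlt l u ++ if e.headD 0 == u then [e] else [] := by
  simp only [pvFlt, List.filter_append, List.filter_cons, List.filter_nil]

lemma winform (e : List Int) :
    (((e.length == 2) && (PySem.List.pyGetD e 1 0 == 1)) = true) ↔ e = [e.headD 0, 1] := by
  match e with
  | [] => simp
  | [a] => simp
  | [a, b] => simp [PySem.List.pyGetD]
  | a :: b :: x :: t => simp [PySem.List.pyGetD]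

lemma B_inv (l : List (List Int)) :
    (∀ u, (l.foldl solutionAltStep (PySem.Dict.empty, PySem.Dict.empty)).1.getD u 0
            = ((pvFlt l u).length : Int)) ∧
    (l.foldl solutionAltStep (PySem.Dict.empty, PySem.Dict.empty)).2.keys.Nodup ∧
    (∀ u, (l.foldl solutionAltStep (PySem.Dict.empty, PySem.Dict.empty)).2.get? u
            = (pvWin l u).map (fun i => ((i : Nat) : Int) + 1)) := by
  induction l using List.reverseRecOn with
  | nil =>
    refine ⟨fun u => ?_, ?_, fun u => ?_⟩ <;>
      simp [pvFlt, pvWin, PySem.Dict.getD_empty, PySem.Dict.get?_empty, PySem.Dict.keys_empty,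
        PySem.List.index?]
  | append_singleton l e ih =>
    obtain ⟨ih1, ih2, ih3⟩ := ih
    rw [List.foldl_append]
    set st := l.foldl solutionAltStep (PySem.Dict.empty, PySem.Dict.empty) with hst
    simp only [List.foldl_cons, List.foldl_nil]
    have hcont : st.2.contains (e.headD 0) = (pvWin l (e.headD 0)).isSome := by
      rw [PySem.Dict.contains_eq_isSome_get?, ih3]
      cases pvWin l (e.headD 0) <;> simp
    have hnotmem : ∀ (hn : pvWin l (e.headD 0) = none), [e.headD 0, 1] ∉ pvFlt l (e.headD 0) := by
      intro hn hm
      have := (PySem.List.index?_isSome_iff (pvFlt l (e.headD 0)) [e.headD 0, 1]).mpr hm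
      rw [← pvWin, hn] at this; simp at this
    have h1 : ∀ v, (st.1.insert (e.headD 0) (st.1.getD (e.headD 0) 0 + 1)).getD v 0
        = ((pvFlt (l ++ [e]) v).length : Int) := by
      intro v
      rw [PySem.Dict.getD_insert, pvFlt_append]
      by_cases hv : v = e.headD 0
      · subst hv; simp [ih1]
      · have hne : (e.headD 0 == v) = false := beq_eq_false_iff_ne.mpr (fun h => hv h.symm)
        rw [if_neg hv, hne]
        simp [ih1]
    have hwin_ne : ∀ v, v ≠ e.headD 0 → pvWin (l ++ [e]) v = pvWin l v := by
      intro v hv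
      rw [pvWin, pvFlt_append]
      have hne : (e.headD 0 == v) = false := beq_eq_false_iff_ne.mpr (fun h => hv h.symm)
      rw [hne]
      simp only [Bool.false_eq_true, if_false, List.append_nil]
      rfl
    rcases hwl : pvWin l (e.headD 0) with _ | i
    · by_cases hw : e = [e.headD 0, 1]
      · -- first win of this user: condition true, both dicts updated
        have hcond : (!(st.2.contains (e.headD 0)) && (e.length == 2) && (PySem.List.pyGetD e 1 0 == 1)) = true := by
          rw [Bool.and_assoc]
          exact (Bool.and_eq_true _ _).mpr ⟨by rw [hcont, hwl]; rfl, (winform e).mpr hw⟩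
        have hstep : solutionAltStep st e
            = (st.1.insert (e.headD 0) (st.1.getD (e.headD 0) 0 + 1),
               st.2.insert (e.headD 0) (st.1.getD (e.headD 0) 0 + 1)) := by
          simp only [solutionAltStep]
          rw [hcond]
          simp
        rw [hstep]
        refine ⟨h1, PySem.Dict.nodup_keys_insert _ _ _ ih2, fun v => ?_⟩
        by_cases hv : v = e.headD 0
        · subst hv
          rw [PySem.Dict.get?_insert_self]
          have : pvWin (l ++ [e]) (e.headD 0) = some (pvFlt l (e.headD 0)).length := by
            rw [pvWin, pvFlt_append]
            simp only [BEq.rfl, if_true]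
            conv_lhs => rw [hw]
            exact PySem.List.index?_append_singleton_self _ _ (hnotmem hwl)
          rw [this, ih1]; simp
        · rw [PySem.Dict.get?_insert_of_ne _ _ hv, ih3, hwin_ne v hv]
      · -- not a winning row: condition false
        have hcond : (!(st.2.contains (e.headD 0)) && (e.length == 2) && (PySem.List.pyGetD e 1 0 == 1)) = false := by
          rcases h2 : ((e.length == 2) && (PySem.List.pyGetD e 1 0 == 1)) with _ | _
          · rw [Bool.and_assoc, h2]; simp
          · exact absurd ((winform e).mp h2) hw
        have hstep : solutionAltStep st e
            = (st.1.insert (e.headD 0) (st.1.getD (e.headD 0) 0 + 1), st.2) := by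
          simp only [solutionAltStep]
          rw [hcond]
          simp
        rw [hstep]
        refine ⟨h1, ih2, fun v => ?_⟩
        by_cases hv : v = e.headD 0
        · subst hv
          have : pvWin (l ++ [e]) (e.headD 0) = none := by
            rw [pvWin]
            rw [PySem.List.index?_eq_none_iff]
            rw [pvFlt_append]
            intro hm
            rcases List.mem_append.mp hm with hm | hm
            · exact hnotmem hwl hm
            · simp only [BEq.rfl, if_true, List.mem_singleton] at hm
              exact hw hm.symm
          rw [this, ih3, hwl]
        · rw [ih3, hwin_ne v hv]
    · -- user already won: condition false whatever e is
      have hcond : (!(st.2.contains (e.headD 0)) && (e.length == 2) && (PySem.List.pyGetD e 1 0 == 1)) = false := by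
        rw [Bool.and_assoc, hcont, hwl]
        simp
      have hstep : solutionAltStep st e
          = (st.1.insert (e.headD 0) (st.1.getD (e.headD 0) 0 + 1), st.2) := by
        simp only [solutionAltStep]
        rw [hcond]
        simp
      rw [hstep]
      refine ⟨h1, ih2, fun v => ?_⟩
      by_cases hv : v = e.headD 0
      · subst hv
        have hmem : [e.headD 0, 1] ∈ pvFlt l (e.headD 0) :=
          (PySem.List.index?_isSome_iff _ _).mp (by rw [← pvWin, hwl]; rfl)
        have : pvWin (l ++ [e]) (e.headD 0) = pvWin l (e.headD 0) := by
          rw [pvWin, pvFlt_append]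
          simp only [BEq.rfl, if_true]
          exact PySem.List.index?_append_of_mem _ hmem
        rw [this, ih3]
      · rw [ih3, hwin_ne v hv]

lemma solution_eq_alt (l : List (List Int)) : solution l = solution_alt l := by
  unfold solution solution_alt
  dsimp only
  obtain ⟨h1, h2, h3⟩ := B_inv l
  set st := l.foldl solutionAltStep (PySem.Dict.empty, PySem.Dict.empty) with hst
  rw [A_fold l _ 0 0]
  set W := (PySem.Set.ofList (l.map (fun e => e.headD 0))).filter (fun u => (pvWin l u).isSome) with hW
  have hWnd : W.Nodup := (PySem.Set.nodup_ofList _).filter _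
  have hmemK : ∀ u, u ∈ st.2.keys ↔ (pvWin l u).isSome := by
    intro u
    rw [← PySem.Dict.contains_iff_mem_keys, PySem.Dict.contains_eq_isSome_get?, h3]
    cases pvWin l u <;> simp
  have hmemW : ∀ u, u ∈ W ↔ (pvWin l u).isSome := by
    intro u
    rw [hW, List.mem_filter]
    constructor
    · rintro ⟨-, hs⟩; exact hs
    · intro hs
      refine ⟨?_, hs⟩
      have hmem : [u, 1] ∈ pvFlt l u := (PySem.List.index?_isSome_iff _ _).mp hs
      rw [pvFlt, List.mem_filter] at hmem
      rw [PySem.Set.mem_ofList, List.mem_map]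
      exact ⟨[u, 1], hmem.1, by simp⟩
  have hperm : W.Perm st.2.keys :=
    (List.perm_ext_iff_of_nodup hWnd h2).mpr (fun u => (hmemW u).trans (hmemK u).symm)
  have hvals : st.2.values = st.2.keys.map (pvPos l) := by
    rw [PySem.Dict.values_eq_map_keys st.2 h2 0]
    refine List.map_congr_left (fun k hk => ?_)
    obtain ⟨i, hi⟩ := Option.isSome_iff_exists.mp ((hmemK k).mp hk)
    rw [PySem.Dict.getD_eq_get?_getD, h3, hi]
    simp [pvPos, hi]
  have hsize : st.2.size = st.2.keys.length := by
    simp only [PySem.Dict.size, PySem.Dict.keys, List.length_map]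
  have hlen : W.length = st.2.keys.length := hperm.length_eq
  have hsum : (W.map (pvPos l)).sum = st.2.values.sum := by
    rw [hvals]
    exact (hperm.map (pvPos l)).sum_eq
  simp only [zero_add]
  by_cases hz : st.2.keys.length = 0
  · rw [if_pos, if_pos]
    · simp [hsize, hz]
    · simp [hlen, hz]
  · rw [if_neg, if_neg]
    · rw [hsum, hlen, hsize]
      have hS : 0 ≤ st.2.values.sum := by
        rw [hvals]
        refine List.sum_nonneg (fun x hx => ?_)
        obtain ⟨k, -, rfl⟩ := List.mem_map.mp hx
        simp [pvPos]
        positivity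
      have hP : (0 : Int) < (st.2.keys.length : Int) := by
        omega
      rw [PySem.Int.floordiv_eq_ediv_of_pos hP]
      show Int.tdiv _ _ = _
      exact Int.tdiv_eq_ediv_of_nonneg hS
    · simp [hsize, hz]
    · simp [hlen, hz]

-- ===== VERDICT (by name: the statement is the Claim_ definition above) =====
theorem solution_spec : Claim_equal_solution := by
  intro lottery _ _
  unfold Spec_solution
  exact solution_eq_alt lottery
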